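-- pv_equiv track=rewrite | github.com/EmilioUnityDev/program-group-manager | core/launcher.py | _windowsapps_needle
-- ===== SOURCE A (Python) =====
-- def _windowsapps_needle(exe_path: str) -> str | None:
--     """
--     If *exe_path* lives inside a WindowsApps folder (e.g. Slack, ChatGPT stored
--     as Win32 paths in groups.json), return a version-independent substring needle
--     built from the PackageFamilyName only.
--
--     WindowsApps folder format:
--       ...\\\\WindowsApps\\\\<PFN>_<version>_<arch>__<publisherId>\\\\...
--
--     We strip everything from the first version-segment (starts with a digit)
--     and use only the PFN, which never changes on update.
--
--     Returns None if the path is not inside WindowsApps.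
--     """
--     low = exe_path.lower()
--     idx = low.find("\\windowsapps\\")
--     if idx == -1:
--         return None
--     # Grab the folder name immediately after \\WindowsApps\\
--     rest = low[idx + len("\\windowsapps\\"):]
--     folder = rest.split("\\")[0]   # e.g. "com.tinyspeck.slackdesktop_4.48.100.0_x64__8yrtsj140pw4g"
--     # PFN = segments before the first one that starts with a digit (that's the version)
--     pfn_parts: list[str] = []
--     for part in folder.split("_"):
--         if part and part[0].isdigit():
--             break
--         pfn_parts.append(part)
--     if not pfn_parts:
--         return None
--     return f"windowsapps\\{'_'.join(pfn_parts)}"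
-- ===== SOURCE B (Python) =====
-- def _windowsapps_needle(exe_path: str) -> str | None:
--     low = exe_path.lower()
--     idx = low.find("\\windowsapps\\")
--     if idx == -1:
--         return None
--     folder = low[idx + 13:].partition("\\")[0]
--     at_boundary = True  # True at the folder start and right after an underscore
--     for i, ch in enumerate(folder):
--         if at_boundary and ch.isdigit():
--             return None if i == 0 else "windowsapps\\" + folder[:i - 1]
--         at_boundary = ch == "_"
--     return "windowsapps\\" + folder
-- ===== Notes on version B (the rewrite author's own statement) =====
-- stated objective: simpler
-- what changed: Replaced the split-on-underscore / accumulate-parts / join pipeline with a single character scan over the folder name that tracks a segment-boundary flag and cuts at the first digit-led segment, so no intermediate part lists are built.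
import Mathlib
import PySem

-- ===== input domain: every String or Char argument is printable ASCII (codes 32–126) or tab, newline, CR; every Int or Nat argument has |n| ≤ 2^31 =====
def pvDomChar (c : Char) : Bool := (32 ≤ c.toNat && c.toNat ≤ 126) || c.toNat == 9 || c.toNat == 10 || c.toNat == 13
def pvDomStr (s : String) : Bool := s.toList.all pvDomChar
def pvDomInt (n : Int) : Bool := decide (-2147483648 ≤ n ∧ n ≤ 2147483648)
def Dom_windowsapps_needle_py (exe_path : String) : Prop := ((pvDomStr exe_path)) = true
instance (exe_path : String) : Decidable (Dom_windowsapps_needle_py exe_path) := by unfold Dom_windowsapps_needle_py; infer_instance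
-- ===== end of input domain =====

-- B replaces A's split-on-underscore / accumulate-parts / join pipeline with a single character scan over the
-- folder name tracking a segment-boundary flag (simpler; same O(n) cost; return value only, no side effects).

-- ===== PORT A =====
-- 'for part in folder.split("_"): if part and part[0].isdigit(): break; pfn_parts.append(part)'
def pvPartsTake : List (List Char) → List (List Char)
  | [] => []
  | p :: ps =>
    if p ≠ [] && PySem.Chars.isdigit (p.headD ' ') then []
    else p :: pvPartsTake ps

def windowsapps_needle_py (exe_path : String) : Option String :=
  let low := PySem.Chars.lower exe_path.toList
  let idx := PySem.Chars.find low "\\windowsapps\\".toList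
  if idx = -1 then none
  else
    -- rest = low[idx + len("\\windowsapps\\"):]
    let rest := PySem.Chars.slice low (some (idx + 13)) none
    -- folder = rest.split("\\")[0]  (split never returns an empty list, so [0] is its head)
    let folder := (PySem.Chars.splitOn rest ['\\']).headD []
    let parts := pvPartsTake (PySem.Chars.splitOn folder ['_'])
    if parts = [] then none
    else some (String.ofList ("windowsapps\\".toList ++ PySem.Chars.join ['_'] parts))

-- ===== PORT B =====
-- 'for i, ch in enumerate(folder): …' with the at_boundary flag
def pvBScan (folder : List Char) : List Char → Nat → Bool → Option String
  | [], _, _ => some (String.ofList ("windowsapps\\".toList ++ folder))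
  | ch :: rest, i, atB =>
    if atB && PySem.Chars.isdigit ch then
      if i = 0 then none
      else some (String.ofList ("windowsapps\\".toList ++ folder.take (i - 1)))
    else pvBScan folder rest (i + 1) (ch == '_')

def windowsapps_needle_py_alt (exe_path : String) : Option String :=
  let low := PySem.Chars.lower exe_path.toList
  let idx := PySem.Chars.find low "\\windowsapps\\".toList
  if idx = -1 then none
  else
    -- folder = low[idx + 13:].partition("\\")[0]; partition(sep)[0] is the prefix before the first sep — exact for a 1-char sep
    let folder := (PySem.Chars.slice low (some (idx + 13)) none).takeWhile (fun c => c != '\\')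
    pvBScan folder folder 0 true

-- ===== PRECONDITION & SPEC =====
def Spec_windowsapps_needle_py (exe_path : String) (out : Option String) : Prop := out = windowsapps_needle_py_alt exe_path
instance (exe_path : String) (out : Option String) : Decidable (Spec_windowsapps_needle_py exe_path out) := by unfold Spec_windowsapps_needle_py; infer_instance

-- ===== CLAIM (what is proved, stated in full; the proofs are below) =====
def Claim_equal_windowsapps_needle_py : Prop := ∀ (exe_path : String), Dom_windowsapps_needle_py exe_path → Spec_windowsapps_needle_py exe_path (windowsapps_needle_py exe_path)

-- ===== LEMMAS AND PROOFS =====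

-- simple cons-recursive model of Python's split on a single-character separator
def pvSp (c : Char) : List Char → List (List Char)
  | [] => [[]]
  | a :: s => if a == c then [] :: pvSp c s else List.modifyHead (a :: ·) (pvSp c s)

-- the first index i in s with s[i] a digit and i at a segment boundary (start / right after an underscore)
def pvFB (seg : Bool) : List Char → Option Nat
  | [] => none
  | ch :: rest => if seg && PySem.Chars.isdigit ch then some 0 else (pvFB (ch == '_') rest).map (· + 1)

-- the parts A keeps: all of them at a boundary, the first unconditionally when mid-segment
def pvKeep (seg : Bool) (ps : List (List Char)) : List (List Char) :=
  if seg then pvPartsTake ps else ps.headD [] :: pvPartsTake ps.tail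

theorem pvSp_ne_nil (c : Char) (s : List Char) : pvSp c s ≠ [] := by
  induction s with
  | nil => simp [pvSp]
  | cons a s ih =>
    simp only [pvSp]
    split
    · simp
    · cases h : pvSp c s with
      | nil => exact absurd h ih
      | cons p ps => simp [List.modifyHead]

theorem pvSplitOn_go_eq (c : Char) : ∀ (fuel : Nat) (l cur : List Char) (hacc : List (List Char)),
    l.length < fuel →
    PySem.Chars.splitOn.go [c] fuel l cur hacc = hacc.reverse ++ List.modifyHead (cur.reverse ++ ·) (pvSp c l) := by
  intro fuel
  induction fuel with
  | zero => intro l cur hacc h; omega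
  | succ fuel ih =>
    intro l cur hacc h
    cases l with
    | nil => simp [PySem.Chars.splitOn.go, pvSp, List.modifyHead]
    | cons a rest =>
      rw [PySem.Chars.splitOn.go]
      by_cases hac : a = c
      · subst hac
        simp only [List.isPrefixOf, BEq.rfl, Bool.and_self, if_pos]
        simp only [List.length_cons, List.length_nil, Nat.zero_add, List.drop_succ_cons, List.drop_zero]
        rw [ih rest [] (cur.reverse :: hacc) (by simp at h; omega)]
        simp only [pvSp, BEq.rfl, if_pos, List.modifyHead, List.reverse_cons, List.append_assoc,
          List.nil_append, List.cons_append]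
        congr 1
        cases pvSp a rest <;> simp
      · have : ([c].isPrefixOf (a :: rest)) = false := by
          simp [List.isPrefixOf]; exact fun hh => absurd hh.symm hac
        rw [this]
        simp only [Bool.false_eq_true, ite_false]
        rw [ih rest (a :: cur) hacc (by simp at h; omega)]
        have : pvSp c (a :: rest) = List.modifyHead (a :: ·) (pvSp c rest) := by
          simp [pvSp, hac]
        rw [this]
        congr 1
        cases hsp : pvSp c rest with
        | nil => simp [List.modifyHead]
        | cons p ps => simp [List.modifyHead]

theorem pvSplitOn_eq_pvSp (c : Char) (s : List Char) :
    PySem.Chars.splitOn s [c] = pvSp c s := by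
  rw [PySem.Chars.splitOn, pvSplitOn_go_eq c (s.length + 1) s [] [] (by omega)]
  cases hsp : pvSp c s <;> simp [List.modifyHead]

theorem pvSp_headD (c : Char) (s : List Char) :
    (pvSp c s).headD [] = s.takeWhile (fun x => x != c) := by
  induction s with
  | nil => simp [pvSp]
  | cons a s ih =>
    by_cases hac : a = c
    · subst hac; simp [pvSp, List.takeWhile]
    · simp only [pvSp, beq_iff_eq, if_neg hac]
      cases hsp : pvSp c s with
      | nil => exact absurd hsp (pvSp_ne_nil _ _)
      | cons p ps =>
        simp only [List.modifyHead, List.headD]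
        rw [hsp] at ih
        simp at ih
        subst ih
        have : (a != c) = true := by simp [hac]
        simp [List.takeWhile, this]

theorem pvBScan_eq (folder : List Char) : ∀ (rem : List Char) (acc : List Char) (atB : Bool),
    folder = acc.reverse ++ rem →
    pvBScan folder rem acc.length atB =
      match pvFB atB rem with
      | none => some (String.ofList ("windowsapps\\".toList ++ folder))
      | some 0 => if acc.length = 0 then none
                  else some (String.ofList ("windowsapps\\".toList ++ folder.take (acc.length - 1)))
      | some (k+1) => some (String.ofList ("windowsapps\\".toList ++ folder.take (acc.length + k))) := by
  intro rem
  induction rem with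
  | nil => intro acc atB h; simp [pvBScan, pvFB]
  | cons ch rest ih =>
    intro acc atB h
    by_cases hc : (atB && PySem.Chars.isdigit ch) = true
    · simp [pvBScan, pvFB, hc]
    · have hfold : folder = (ch :: acc).reverse ++ rest := by
        rw [h]; simp
      have := ih (ch :: acc) (ch == '_') hfold
      simp only [List.length_cons] at this
      simp only [pvBScan, hc, Bool.false_eq_true, ite_false, pvFB]
      rw [this]
      cases hfb : pvFB (ch == '_') rest with
      | none => simp
      | some k =>
        cases k with
        | zero => simp [Option.map]
        | succ k =>
          simp only [Option.map]
          have : acc.length + 1 + k = acc.length + (k + 1) := by omega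
          rw [this]

theorem pvIc (x y : List Char) (zs : List (List Char)) :
    List.intercalate ['_'] (x :: y :: zs) = x ++ '_' :: List.intercalate ['_'] (y :: zs) := by
  simp [List.intercalate, List.intersperse]

-- which parts A keeps vs the first boundary digit: all (join = s) when none; none at index 0; join = s.take k at k+1
theorem pvPartsTake_eq (s : List Char) : ∀ (seg : Bool),
    (match pvFB seg s with
      | none => pvKeep seg (pvSp '_' s) = pvSp '_' s ∧ List.intercalate ['_'] (pvSp '_' s) = s
      | some 0 => pvPartsTake (pvSp '_' s) = [] ∧ seg = true
      | some (k+1) => pvKeep seg (pvSp '_' s) ≠ [] ∧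
          List.intercalate ['_'] (pvKeep seg (pvSp '_' s)) = s.take k) := by
  induction s with
  | nil => intro seg; simp [pvFB, pvSp, pvKeep, pvPartsTake, List.intercalate]
  | cons a s ih =>
    intro seg
    by_cases ha : a = '_'
    · subst ha
      have hnd : PySem.Chars.isdigit '_' = false := by decide
      have hsp : pvSp '_' ('_' :: s) = [] :: pvSp '_' s := by simp [pvSp]
      have hkeep : pvKeep seg ([] :: pvSp '_' s) = [] :: pvPartsTake (pvSp '_' s) := by
        cases seg <;> simp [pvKeep, pvPartsTake]
      have hfb : pvFB seg ('_' :: s) = (pvFB true s).map (· + 1) := by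
        simp [pvFB, hnd]
      rw [hfb, hsp, hkeep]
      have := ih true
      cases hfbs : pvFB true s with
      | none =>
        rw [hfbs] at this
        simp only [pvKeep, if_pos] at this
        obtain ⟨h1, h2⟩ := this
        refine ⟨by rw [h1], ?_⟩
        cases hsp2 : pvSp '_' s with
        | nil => exact absurd hsp2 (pvSp_ne_nil _ _)
        | cons p ps =>
          rw [hsp2] at h2
          rw [pvIc [] p ps, h2]
          simp
      | some k =>
        cases k with
        | zero =>
          rw [hfbs] at this
          obtain ⟨h1, _⟩ := this
          simp [Option.map, h1, List.intercalate]
        | succ k =>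
          rw [hfbs] at this
          simp only [pvKeep, if_pos] at this
          obtain ⟨h1, h2⟩ := this
          simp only [Option.map]
          refine ⟨by simp, ?_⟩
          cases hpt : pvPartsTake (pvSp '_' s) with
          | nil => exact absurd hpt h1
          | cons q qs =>
            rw [hpt] at h2
            simp [pvIc, h2]
    · -- a ≠ '_'
      obtain ⟨p, ps, hsp2⟩ : ∃ p ps, pvSp '_' s = p :: ps := by
        cases h : pvSp '_' s with
        | nil => exact absurd h (pvSp_ne_nil _ _)
        | cons p ps => exact ⟨p, ps, rfl⟩
      have hsp : pvSp '_' (a :: s) = (a :: p) :: ps := by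
        simp [pvSp, ha, hsp2, List.modifyHead]
      have hab : (a == '_') = false := by simp [ha]
      by_cases hd : (seg && PySem.Chars.isdigit a) = true
      · -- break at 0
        have hfb : pvFB seg (a :: s) = some 0 := by simp [pvFB, hd]
        rw [hfb, hsp]
        simp only [Bool.and_eq_true] at hd
        constructor
        · simp [pvPartsTake, List.headD, hd.2]
        · exact hd.1
      · have hfb : pvFB seg (a :: s) = (pvFB false s).map (· + 1) := by
          simp only [pvFB, hd, Bool.false_eq_true, ite_false, hab]
        have hkeep : pvKeep seg ((a :: p) :: ps) = (a :: p) :: pvPartsTake ps := by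
          cases seg with
          | false => simp [pvKeep]
          | true =>
            have : PySem.Chars.isdigit a = false := by
              cases h : PySem.Chars.isdigit a
              · rfl
              · exact absurd (by simp [h]) hd
            simp [pvKeep, pvPartsTake, this]
        rw [hfb, hsp, hkeep]
        have := ih false
        simp only [pvKeep, Bool.false_eq_true, ite_false, hsp2, List.headD, List.tail] at this
        cases hfbs : pvFB false s with
        | none =>
          rw [hfbs] at this
          obtain ⟨h1, h2⟩ := this
          have hps : pvPartsTake ps = ps := by
            injection h1
          have hp : List.intercalate ['_'] (p :: ps) = s := h2
          refine ⟨by rw [hps], ?_⟩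
          cases ps with
          | nil => simp_all [List.intercalate]
          | cons q qs => rw [pvIc] at hp ⊢; simp [hp]
        | some k =>
          cases k with
          | zero =>
            rw [hfbs] at this
            exact absurd this.2 (by simp)
          | succ k =>
            rw [hfbs] at this
            obtain ⟨h1, h2⟩ := this
            simp only [Option.map]
            refine ⟨by simp, ?_⟩
            cases hpt : pvPartsTake ps with
            | nil => simp_all [List.intercalate]
            | cons q qs =>
              rw [hpt] at h2
              rw [pvIc] at h2
              rw [pvIc]
              simp [h2]

-- A's core (take parts, join) equals B's scan on any folder name
theorem pvCore_eq (folder : List Char) :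
    (if pvPartsTake (pvSp '_' folder) = [] then none
     else some (String.ofList ("windowsapps\\".toList ++ List.intercalate ['_'] (pvPartsTake (pvSp '_' folder))))) =
    pvBScan folder folder 0 true := by
  have hB := pvBScan_eq folder folder [] true (by simp)
  simp only [List.length_nil] at hB
  have hA := pvPartsTake_eq folder true
  cases hfb : pvFB true folder with
  | none =>
    rw [hfb] at hB hA
    simp only [pvKeep, if_pos] at hA
    obtain ⟨h1, h2⟩ := hA
    rw [hB, h1, h2, if_neg (pvSp_ne_nil '_' folder)]
  | some k =>
    cases k with
    | zero =>
      rw [hfb] at hB hA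
      rw [hB, if_pos hA.1]
      simp
    | succ k =>
      rw [hfb] at hB hA
      simp only [pvKeep, if_pos] at hA
      obtain ⟨h1, h2⟩ := hA
      rw [hB, if_neg h1, h2]
      simp

-- ===== VERDICT (by name: the statement is the Claim_ definition above) =====
theorem windowsapps_needle_py_spec : Claim_equal_windowsapps_needle_py := by
  unfold Claim_equal_windowsapps_needle_py Spec_windowsapps_needle_py
  intro exe_path _
  unfold windowsapps_needle_py windowsapps_needle_py_alt
  by_cases hidx : PySem.Chars.find (PySem.Chars.lower exe_path.toList) "\\windowsapps\\".toList = -1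
  · rw [if_pos hidx, if_pos hidx]
  · rw [if_neg hidx, if_neg hidx]
    dsimp only
    rw [pvSplitOn_eq_pvSp '\\', pvSp_headD '\\', pvSplitOn_eq_pvSp '_']
    rw [PySem.Chars.join]
    exact pvCore_eq _
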